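-- pv_equiv track=rewrite | github.com/homile/PythonStudy | 2022/02.05_33주차/20220205(2).py | solution
-- ===== SOURCE A (Python) =====
-- def solution(n, left, right):
--     answer = []
--     list1 = [[0 for _ in range(n)] for _ in range(n)]   # 빈 배열 생성
--     for i in range(len(list1)):
--         for j in range(len(list1[0])):
--             if j+1 < i+1:
--                 answer.append(i+1)
--             else:
--                 answer.append(j+1)
--
--     # for i in range(left, right+1):
--     #     answer.append(answer[i])
--
--     return answer[left:right+1]
-- ===== SOURCE B (Python) =====
-- def solution(n, left, right):
--     return [max(divmod(i, n)) + 1 for i in range(n * n)[left:right + 1]]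
-- ===== Notes on version B (the rewrite author's own statement) =====
-- stated objective: faster
-- what changed: B never builds the n*n grid: it slices the range of flat indices (O(1)) and computes each requested cell directly as max(divmod(i, n)) + 1; Pre_ excludes negative n (outside the task's natural domain of grid sizes), where A's empty row loop accidentally yields [] while B's flat range(n*n) is nonempty.
-- outside the precondition, e.g. on solution(-2, 0, 3): A returns [], B returns [1, 0, 1, 0]
import Mathlib
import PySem

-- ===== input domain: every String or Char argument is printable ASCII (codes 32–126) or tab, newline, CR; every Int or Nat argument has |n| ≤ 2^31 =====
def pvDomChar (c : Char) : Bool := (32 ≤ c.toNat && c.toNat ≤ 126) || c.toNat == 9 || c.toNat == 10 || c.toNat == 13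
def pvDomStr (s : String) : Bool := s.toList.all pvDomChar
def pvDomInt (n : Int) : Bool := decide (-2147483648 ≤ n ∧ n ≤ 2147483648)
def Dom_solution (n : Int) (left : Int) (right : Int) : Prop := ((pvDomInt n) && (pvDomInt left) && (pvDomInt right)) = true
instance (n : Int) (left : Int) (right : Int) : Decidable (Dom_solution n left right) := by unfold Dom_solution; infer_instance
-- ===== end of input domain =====

-- B never builds the n*n grid: each requested cell is max(i//n, i%n)+1 (objective: faster).

-- ===== PORT A =====
def solution (n : Int) (left : Int) (right : Int) : List Int :=
  let list1 : List (List Int) :=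
    (PySem.List.pyRange 0 n 1).map (fun _ => (PySem.List.pyRange 0 n 1).map (fun _ => (0 : Int)))
  let answer : List Int :=
    (PySem.List.pyRange 0 (list1.length : Int) 1).foldl (fun acc i =>
      (PySem.List.pyRange 0 (((PySem.List.pyGetD list1 0 []).length : Nat) : Int) 1).foldl (fun acc j =>
        if j + 1 < i + 1 then acc ++ [i + 1] else acc ++ [j + 1]) acc) []
  PySem.List.slice answer (some left) (some (right + 1))

-- ===== PORT B =====
def solution_alt (n : Int) (left : Int) (right : Int) : List Int :=
  (PySem.List.slice (PySem.List.pyRange 0 (n * n) 1) (some left) (some (right + 1))).map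
    (fun i => max (PySem.Int.floordiv i n) (PySem.Int.mod i n) + 1)

-- ===== PRECONDITION & SPEC =====
-- Pre_ excludes only negative n, outside the task's natural domain of grid sizes: there A's row
-- loop over range(n) is empty so A accidentally returns [], while B's flat range(n*n) is nonempty.
def Pre_solution (n : Int) (left : Int) (right : Int) : Prop := 0 ≤ n
instance (n : Int) (left : Int) (right : Int) : Decidable (Pre_solution n left right) := by
  unfold Pre_solution; infer_instance

def pvWitness_solution : Int × Int × Int := (3, 2, 7)

def Spec_solution (n : Int) (left : Int) (right : Int) (out : List Int) : Prop := out = solution_alt n left right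
instance (n : Int) (left : Int) (right : Int) (out : List Int) : Decidable (Spec_solution n left right out) := by unfold Spec_solution; infer_instance

-- ===== CLAIM (what is proved, stated in full; the proofs are below) =====
def Claim_equal_solution : Prop := ∀ (n : Int) (left : Int) (right : Int), Dom_solution n left right → Pre_solution n left right → Spec_solution n left right (solution n left right)

-- ===== LEMMAS AND PROOFS =====

-- the cell formula B uses, over flat Nat indices (proof-side helper)
def pvF (N k : Nat) : Int :=
  max (PySem.Int.floordiv (k : Int) (N : Int)) (PySem.Int.mod (k : Int) (N : Int)) + 1

-- inner Python loop: appending one element per iteration is mapping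
theorem pv_foldl_app {α β : Type} (l : List α) (g : α → β) (acc : List β) :
    l.foldl (fun a j => a ++ [g j]) acc = acc ++ l.map g := by
  induction l generalizing acc with
  | nil => simp
  | cons x xs ih => simp [List.foldl, ih]

-- outer Python loop: appending one block per iteration is flatMap
theorem pv_foldl_blocks {α β : Type} (l : List α) (g : α → List β) (acc : List β) :
    l.foldl (fun a i => a ++ g i) acc = acc ++ l.flatMap g := by
  induction l generalizing acc with
  | nil => simp
  | cons x xs ih => simp [List.foldl, ih]

-- value of one grid cell, read off from the flat index
theorem pv_cell (N i j : Nat) (hN : 0 < N) (hj : j < N) :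
    pvF N (i * N + j) = max (i : Int) (j : Int) + 1 := by
  have hNZ : (0 : Int) < (N : Int) := by exact_mod_cast hN
  have hd : PySem.Int.floordiv ((i * N + j : Nat) : Int) (N : Int) = (i : Int) := by
    rw [PySem.Int.floordiv_eq_iff_of_pos hNZ]
    constructor
    · push_cast; nlinarith
    · push_cast; nlinarith
  have hm : PySem.Int.mod ((i * N + j : Nat) : Int) (N : Int) = (j : Int) := by
    have h := PySem.Int.floordiv_mul_add_mod ((i * N + j : Nat) : Int) (N : Int)
    rw [hd] at h
    push_cast at h ⊢
    linarith
  simp only [pvF]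
  push_cast at hd hm ⊢
  rw [hd, hm]

-- flat range of length M*N, mapped through the cell formula, is the row-by-row grid
theorem pv_grid (N M : Nat) (hN : 0 < N) :
    (List.range (M * N)).map (pvF N)
      = (List.range M).flatMap (fun (i : Nat) => (List.range N).map (fun (j : Nat) => (max (i : Int) (j : Int) + 1))) := by
  induction M with
  | zero => simp
  | succ M ih =>
    rw [Nat.succ_mul, List.range_add, List.map_append, ih, List.range_succ, List.flatMap_append]
    congr 1
    simp only [List.flatMap_cons, List.flatMap_nil, List.append_nil, List.map_map]
    apply List.map_congr_left
    intro j hj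
    simp only [List.mem_range] at hj
    simpa [Function.comp, Nat.add_comm] using pv_cell N M j hN hj

-- A, for positive n, is a slice of the flat grid
theorem pv_A_pos (N : Nat) (hN : 0 < N) (l r : Int) :
    solution (N : Int) l r
      = PySem.List.slice ((List.range (N * N)).map (pvF N)) (some l) (some (r + 1)) := by
  have hrange : PySem.List.pyRange 0 (N : Int) 1 = (List.range N).map (fun k => ((k : Nat) : Int)) := by
    rw [PySem.List.pyRange_one]
    simp
  unfold solution
  simp only []
  congr 1
  have hlen1 : ((PySem.List.pyRange 0 (N : Int) 1).map
      (fun _ => (PySem.List.pyRange 0 (N : Int) 1).map (fun _ => (0 : Int)))).length = N := by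
    simp [hrange]
  have hget0 : PySem.List.pyGetD ((PySem.List.pyRange 0 (N : Int) 1).map
      (fun _ => (PySem.List.pyRange 0 (N : Int) 1).map (fun _ => (0 : Int)))) 0 ([] : List Int)
      = (PySem.List.pyRange 0 (N : Int) 1).map (fun _ => (0 : Int)) := by
    rcases N with _ | N
    · omega
    · rw [PySem.List.pyRange_one_cons (by exact_mod_cast Nat.succ_pos N)]
      simp [PySem.List.pyGetD, PySem.List.pyGet?, PySem.List.pyIdx?]
  rw [hlen1, hget0]
  have hlen0 : (((PySem.List.pyRange 0 (N : Int) 1).map (fun _ => (0 : Int))).length : Nat) = N := by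
    simp [hrange]
  rw [hlen0, pv_grid N N hN, hrange, List.foldl_map]
  have hfun : (fun (x : List Int) (y : Nat) =>
      ((List.range N).map (fun k => ((k : Nat) : Int))).foldl (fun acc j =>
        if j + 1 < ((y : Nat) : Int) + 1 then acc ++ [((y : Nat) : Int) + 1] else acc ++ [j + 1]) x)
      = (fun x y => x ++ (List.range N).map (fun j => max ((y : Nat) : Int) ((j : Nat) : Int) + 1)) := by
    funext x y
    rw [List.foldl_map]
    have hbody : (fun (acc : List Int) (j : Nat) =>
        if ((j : Nat) : Int) + 1 < ((y : Nat) : Int) + 1 then acc ++ [((y : Nat) : Int) + 1]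
        else acc ++ [((j : Nat) : Int) + 1])
        = (fun acc j => acc ++ [max ((y : Nat) : Int) ((j : Nat) : Int) + 1]) := by
      funext acc j
      split_ifs with h
      · have hmax : max ((y : Nat) : Int) ((j : Nat) : Int) = ((y : Nat) : Int) := by omega
        rw [hmax]
      · have hmax : max ((y : Nat) : Int) ((j : Nat) : Int) = ((j : Nat) : Int) := by omega
        rw [hmax]
    rw [hbody, pv_foldl_app]
  rw [hfun, pv_foldl_blocks]
  simp

-- slicing commutes with mapping (lengths agree, so the clamped bounds agree)
theorem pv_slice_map {a b : Type} (g : a → b) (xs : List a) (s t : Option Int) :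
    PySem.List.slice (xs.map g) s t = (PySem.List.slice xs s t).map g := by
  unfold PySem.List.slice
  simp [List.map_take, List.map_drop]

-- ===== VERDICT (by name: the statement is the Claim_ definition above) =====
theorem solution_spec : Claim_equal_solution := by
  unfold Claim_equal_solution
  intro n l r _ hpre
  unfold Spec_solution
  unfold Pre_solution at hpre
  obtain ⟨N, rfl⟩ : ∃ N : Nat, n = (N : Int) := ⟨n.toNat, by omega⟩
  unfold solution_alt
  have hNN : (N : Int) * (N : Int) = ((N * N : Nat) : Int) := by push_cast; ring
  have hrange : PySem.List.pyRange 0 ((N : Int) * (N : Int)) 1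
      = (List.range (N * N)).map (fun k => ((k : Nat) : Int)) := by
    rw [PySem.List.pyRange_one, show (N : Int) * (N : Int) - 0 = ((N * N : Nat) : Int) by push_cast; ring]
    simp only [Int.toNat_natCast, zero_add]
  rcases Nat.eq_zero_or_pos N with h0 | hN
  · subst h0
    simp [solution, PySem.List.slice, PySem.List.clampIdx]
  · rw [pv_A_pos N hN l r, hrange, pv_slice_map, pv_slice_map, List.map_map]
    apply List.map_congr_left
    intro k _
    simp [Function.comp, pvF]
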